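-- pv_equiv track=rewrite | github.com/bahanni/t3sheild | src/utils/matrix.py | matrice_transition_edge
-- ===== SOURCE A (Python) =====
-- def matrice_transition_edge(ordered, col_idx, n_col):
--     """
--     Transition pour les colonnes de bord (première ou dernière).
--     ordered : liste linéaire de (status, CNE, power)
--     col_idx : index de la colonne à traiter (0 ou n_col-1)
--     n_col   : nombre total de colonnes
--     """
--     col = ordered[col_idx :: n_col]
--     n = len(col)
--     labs = ['0'] * n
--     i = 0
--     while i < n:
--         status, cne, power = col[i]
--         if status == 'L':
--             labs[i] = '0'
--             i += 1
--         else: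
--             # on collecte le segment de M/H contigus
--             segment = []
--             while i < n and col[i][0] in ('M', 'H'):
--                 segment.append((i, col[i]))
--                 i += 1
--             # priorité aux H
--             if any(st == 'H' for _, (st, _, _) in segment):
--                 for idx, (st, _, _) in segment:
--                     labs[idx] = '1' if st == 'H' else '0'
--             else:
--                 # pas de H → on choisit le M de puissance max
--                 if len(segment) > 1:
--                     max_p = max(p for _, (_, _, p) in segment)
--                     for idx, (_, _, p) in segment:
--                         labs[idx] = '1' if p == max_p else '0'
--                 else:
--                     idx, (_, _, _) = segment[0]
--                     labs[idx] = '1'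
--     # on associe chaque signal à son CNE
--     return [[labs[k], col[k][1]] for k in range(n)]
-- ===== SOURCE B (Python) =====
-- def matrice_transition_edge(ordered, col_idx, n_col):
--     """
--     Dictionary-aggregation rewrite: instead of collecting contiguous M/H
--     segments, key every non-L element by the number of 'L's before it (elements
--     of the same maximal non-L run share that key, runs separated by an L do
--     not), aggregate has-H and max power per key in one dict pass, then label
--     each element independently from the aggregates.
--     """
--     col = ordered[col_idx::n_col]
--     # pass 1: group id = running count of 'L' elements
--     sids = []
--     c = 0
--     for st, _, _ in col:
--         if st == 'L':
--             c += 1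
--         sids.append(c)
--     # pass 2: per-group aggregates over the non-L elements
--     has_h = {}
--     max_p = {}
--     for sid, (st, _, p) in zip(sids, col):
--         if st != 'L':
--             has_h[sid] = has_h.get(sid, False) or st == 'H'
--             max_p[sid] = max(max_p.get(sid, p), p)
--     # pass 3: label each element from its group's aggregates
--     out = []
--     for sid, (st, cne, p) in zip(sids, col):
--         if st == 'L':
--             lab = '0'
--         elif has_h[sid]:
--             lab = '1' if st == 'H' else '0'
--         else:
--             lab = '1' if p == max_p[sid] else '0'
--         out.append([lab, cne])
--     return out
-- ===== Notes on version B (the rewrite author's own statement) =====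
-- stated objective: alternative
-- what changed: Replaces A's index-based while-loop that collects contiguous M/H segments and mutates a label array by a grouping-by-key algorithm: every element is keyed by the running count of preceding 'L's (so a maximal non-L run shares one key), per-key has-H and max-power aggregates are built in one dict pass, and each element is then labelled independently from its key's aggregates.
import Mathlib
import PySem

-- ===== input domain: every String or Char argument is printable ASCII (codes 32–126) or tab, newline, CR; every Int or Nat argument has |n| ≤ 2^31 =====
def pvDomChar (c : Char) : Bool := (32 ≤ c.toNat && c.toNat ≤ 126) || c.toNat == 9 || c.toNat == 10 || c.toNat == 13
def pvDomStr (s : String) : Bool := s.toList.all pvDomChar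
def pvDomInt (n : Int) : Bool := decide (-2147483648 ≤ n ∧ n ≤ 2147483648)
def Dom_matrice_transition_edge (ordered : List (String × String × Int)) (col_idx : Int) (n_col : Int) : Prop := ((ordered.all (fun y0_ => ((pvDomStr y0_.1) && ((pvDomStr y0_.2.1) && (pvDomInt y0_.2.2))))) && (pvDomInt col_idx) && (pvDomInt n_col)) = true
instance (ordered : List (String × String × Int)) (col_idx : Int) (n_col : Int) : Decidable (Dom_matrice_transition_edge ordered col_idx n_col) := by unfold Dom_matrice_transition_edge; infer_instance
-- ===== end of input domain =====

-- B replaces A's segment-collecting while-loop by a grouping-by-key algorithm: each element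
-- is keyed by the running count of preceding 'L's, per-key aggregates (has-H, max power) are
-- built in one dict pass, and every element is labelled independently from its key's aggregates;
-- the equivalence below is about the return value on Pre_ (neither version mutates its input).

-- ===== PORT A =====
-- inner while: collect the contiguous (index, element) segment of 'M'/'H' elements, return it
-- with the remaining suffix
def pvCollectA (xs : List (String × String × Int)) (i : Nat) :
    List (Nat × (String × String × Int)) × List (String × String × Int) :=
  match xs with
  | [] => ([], [])
  | t :: rest =>
    if t.1 == "M" || t.1 == "H" then
      let p := pvCollectA rest (i + 1)
      ((i, t) :: p.1, p.2)
    else ([], t :: rest)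

-- cited by pvLoopA's decreasing_by
theorem pvCollectA_len (xs : List (String × String × Int)) (i : Nat) :
    (pvCollectA xs i).1.length + (pvCollectA xs i).2.length = xs.length := by
  induction xs generalizing i with
  | nil => simp [pvCollectA]
  | cons t rest ih =>
    simp only [pvCollectA]
    split
    · have := ih (i + 1); simp only [List.length_cons]; omega
    · simp

-- outer while loop of A, on the suffix of col starting at index i, mutating labs
def pvLoopA : List (String × String × Int) → Nat → List String → List String
  | [], _, labs => labs
  | t :: rest, i, labs =>
    if t.1 == "L" then
      pvLoopA rest (i + 1) (labs.set i "0")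
    else
      let seg := (pvCollectA (t :: rest) i).1
      let rest' := (pvCollectA (t :: rest) i).2
      if hseg : seg = [] then labs  -- Python raises IndexError here (segment[0]); outside Pre_
      else
        let labs' :=
          if seg.any (fun p => p.2.1 == "H") then
            seg.foldl (fun ls p => ls.set p.1 (if p.2.1 == "H" then "1" else "0")) labs
          else if seg.length > 1 then
            let max_p := (PySem.List.max? (seg.map (fun p => p.2.2.2)) (fun y => y)).getD 0
            seg.foldl (fun ls p => ls.set p.1 (if p.2.2.2 == max_p then "1" else "0")) labs
          else
            labs.set i "1"
        pvLoopA rest' (i + seg.length) labs'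
termination_by xs _ _ => xs.length
decreasing_by
  · simp
  · have h := pvCollectA_len (t :: rest) i
    have h2 : 0 < (pvCollectA (t :: rest) i).1.length := List.length_pos_of_ne_nil hseg
    simp only [List.length_cons] at h ⊢
    omega

def matrice_transition_edge (ordered : List (String × String × Int)) (col_idx : Int) (n_col : Int) : List (List String) :=
  let col := (PySem.List.slice? ordered (some col_idx) none n_col).getD []
  let n := col.length
  let labs := pvLoopA col 0 (List.replicate n "0")
  (List.range n).map (fun k => [labs.getD k "", (col.getD k ("", "", 0)).2.1])

-- ===== PORT B =====
-- pass 1 body: append the running count of 'L's seen so far (incremented first on an 'L')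
def pvSidStep (st : List Int × Int) (t : String × String × Int) : List Int × Int :=
  let c := if t.1 == "L" then st.2 + 1 else st.2
  (st.1 ++ [c], c)

-- pass 2 body: fold one (sid, element) pair into the (has_h, max_p) dicts
def pvAggStep (d : PySem.Dict Int Bool × PySem.Dict Int Int) (p : Int × (String × String × Int)) :
    PySem.Dict Int Bool × PySem.Dict Int Int :=
  if p.2.1 == "L" then d
  else (d.1.insert p.1 ((d.1.getD p.1 false) || (p.2.1 == "H")),
        d.2.insert p.1 (max (d.2.getD p.1 p.2.2.2) p.2.2.2))

-- pass 3 body: label one (sid, element) pair from the aggregates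
def pvLabelOf (d : PySem.Dict Int Bool × PySem.Dict Int Int) (p : Int × (String × String × Int)) : List String :=
  if p.2.1 == "L" then ["0", p.2.2.1]
  else if d.1.getD p.1 false then [if p.2.1 == "H" then "1" else "0", p.2.2.1]
  else [if p.2.2.2 == d.2.getD p.1 0 then "1" else "0", p.2.2.1]

def matrice_transition_edge_alt (ordered : List (String × String × Int)) (col_idx : Int) (n_col : Int) : List (List String) :=
  let col := (PySem.List.slice? ordered (some col_idx) none n_col).getD []
  let sids := (col.foldl pvSidStep ([], 0)).1
  let d := (sids.zip col).foldl pvAggStep (PySem.Dict.empty, PySem.Dict.empty)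
  (sids.zip col).foldl (fun out p => out ++ [pvLabelOf d p]) []

-- ===== PRECONDITION & SPEC =====
-- Pre_ is exactly where the Python A returns: n_col ≠ 0 (slice step) and every status in the
-- sliced column is 'L', 'M' or 'H' (anything else reaches segment[0] on an empty segment).
def Pre_matrice_transition_edge (ordered : List (String × String × Int)) (col_idx : Int) (n_col : Int) : Prop :=
  n_col ≠ 0 ∧
  ∀ t ∈ (PySem.List.slice? ordered (some col_idx) none n_col).getD [],
    t.1 = "L" ∨ t.1 = "M" ∨ t.1 = "H"
instance (ordered : List (String × String × Int)) (col_idx : Int) (n_col : Int) : Decidable (Pre_matrice_transition_edge ordered col_idx n_col) := by unfold Pre_matrice_transition_edge; infer_instance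

def pvWitness_matrice_transition_edge : (List (String × String × Int)) × Int × Int :=
  ([("M", "a", 1), ("H", "b", 2), ("L", "c", 0), ("M", "d", 3), ("M", "e", 3)], 0, 1)

def Spec_matrice_transition_edge (ordered : List (String × String × Int)) (col_idx : Int) (n_col : Int) (out : List (List String)) : Prop := out = matrice_transition_edge_alt ordered col_idx n_col
instance (ordered : List (String × String × Int)) (col_idx : Int) (n_col : Int) (out : List (List String)) : Decidable (Spec_matrice_transition_edge ordered col_idx n_col out) := by unfold Spec_matrice_transition_edge; infer_instance

-- ===== CLAIM (what is proved, stated in full; the proofs are below) =====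
def Claim_equal_matrice_transition_edge : Prop := ∀ (ordered : List (String × String × Int)) (col_idx : Int) (n_col : Int), Dom_matrice_transition_edge ordered col_idx n_col → Pre_matrice_transition_edge ordered col_idx n_col → Spec_matrice_transition_edge ordered col_idx n_col (matrice_transition_edge ordered col_idx n_col)


-- ===== LEMMAS AND PROOFS =====

-- proof-side vocabulary -------------------------------------------------------

def pvIsMH (t : String × String × Int) : Bool := t.1 == "M" || t.1 == "H"

-- the (index, element) pairs A's inner while builds, abstractly
def pvPairs : Nat → List (String × String × Int) → List (Nat × (String × String × Int))
  | _, [] => []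
  | i, x :: xs => (i, x) :: pvPairs (i + 1) xs

-- the labels of one maximal M/H segment (H-priority, else max power)
def pvLabelsMH (seg : List (String × String × Int)) : List String :=
  if seg.any (fun t => t.1 == "H") then
    seg.map (fun t => if t.1 == "H" then "1" else "0")
  else
    seg.map (fun t => if t.2.2 == (PySem.List.max? (seg.map (fun t => t.2.2)) (fun y => y)).getD 0 then "1" else "0")

-- the label column of the whole sliced column
def pvGLabels : List (String × String × Int) → List String
  | [] => []
  | t :: rest =>
    if t.1 == "L" then "0" :: pvGLabels rest
    else pvLabelsMH (t :: rest.takeWhile pvIsMH) ++ pvGLabels (rest.dropWhile pvIsMH)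
termination_by l => l.length
decreasing_by
  · simp
  · have := List.length_dropWhile_le pvIsMH rest; simp; omega

def pvZip (labs : List String) (xs : List (String × String × Int)) : List (List String) :=
  List.zipWith (fun l t => [l, t.2.1]) labs xs

-- generic list facts -----------------------------------------------------------

theorem pvTake_succ_set (l : List String) (i : Nat) (x : String) (h : i < l.length) :
    (l.set i x).take (i + 1) = l.take i ++ [x] := by
  rw [List.set_eq_take_append_cons_drop, if_pos h, List.take_append]
  simp [List.length_take, Nat.min_eq_left (Nat.le_of_lt h)]

theorem pvDrop_set_of_lt (l : List String) (i j : Nat) (x : String) (h : i < j) :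
    (l.set i x).drop j = l.drop j := by
  exact List.drop_set_of_lt h

theorem pvSet_eq (l : List String) (i : Nat) (x : String) (h : i < l.length) :
    l.set i x = l.take i ++ [x] ++ l.drop (i + 1) := by
  rw [List.set_eq_take_append_cons_drop, if_pos h]; simp

-- pvPairs facts ----------------------------------------------------------------

theorem pvPairs_map_snd (i : Nat) (l : List (String × String × Int)) :
    (pvPairs i l).map Prod.snd = l := by
  induction l generalizing i with
  | nil => rfl
  | cons x xs ih => simp [pvPairs, ih]

theorem pvPairs_length (i : Nat) (l : List (String × String × Int)) :
    (pvPairs i l).length = l.length := by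
  have := congrArg List.length (pvPairs_map_snd i l)
  simpa using this

theorem pvPairs_anyH (i : Nat) (l : List (String × String × Int)) :
    ((pvPairs i l).any fun p => p.2.1 == "H") = l.any (fun u => u.1 == "H") := by
  induction l generalizing i with
  | nil => rfl
  | cons x xs ih => simp [pvPairs, ih]

theorem pvPairs_mapPow (i : Nat) (l : List (String × String × Int)) :
    List.map (fun p => p.2.2.2) (pvPairs i l) = l.map (fun u => u.2.2) := by
  induction l generalizing i with
  | nil => rfl
  | cons x xs ih => simp [pvPairs, ih]

theorem pvCollectA_eq (xs : List (String × String × Int)) (i : Nat) :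
    pvCollectA xs i = (pvPairs i (xs.takeWhile pvIsMH), xs.dropWhile pvIsMH) := by
  induction xs generalizing i with
  | nil => rfl
  | cons t rest ih =>
    by_cases h : pvIsMH t
    · have h' : (t.1 == "M" || t.1 == "H") = true := h
      simp [pvCollectA, h', pvIsMH, pvPairs, ih, List.takeWhile_cons, List.dropWhile_cons]
    · have h' : (t.1 == "M" || t.1 == "H") = false := by simpa [pvIsMH] using h
      simp [pvCollectA, h', pvIsMH, List.takeWhile_cons, List.dropWhile_cons, pvPairs]

-- the index-setting foldl writes exactly the slots i .. i+len-1
theorem pvSetFold (lab : (String × String × Int) → String) :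
    ∀ (seg : List (String × String × Int)) (i : Nat) (labs : List String),
      i + seg.length ≤ labs.length →
      (pvPairs i seg).foldl (fun ls p => ls.set p.1 (lab p.2)) labs
        = labs.take i ++ seg.map lab ++ labs.drop (i + seg.length) := by
  intro seg
  induction seg with
  | nil => intro i labs h; simp [pvPairs, List.take_append_drop]
  | cons t seg ih =>
    intro i labs h
    simp only [pvPairs, List.foldl_cons, List.map_cons, List.length_cons] at *
    rw [ih (i + 1) (labs.set i (lab t)) (by simp; omega)]
    rw [pvTake_succ_set labs i (lab t) (by omega),
        pvDrop_set_of_lt labs i (i + 1 + seg.length) (lab t) (by omega)]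
    have : i + 1 + seg.length = i + (seg.length + 1) := by omega
    rw [this]
    simp

-- A-side main lemma ------------------------------------------------------------

theorem pvLabelsMH_length (seg : List (String × String × Int)) :
    (pvLabelsMH seg).length = seg.length := by
  unfold pvLabelsMH; split <;> simp

theorem pvGLabels_length : ∀ (xs : List (String × String × Int)),
    (pvGLabels xs).length = xs.length := by
  intro xs
  induction xs using pvGLabels.induct with
  | case1 => simp [pvGLabels]
  | case2 t rest h ih => rw [pvGLabels]; simp [h, ih]
  | case3 t rest h ih =>
    rw [pvGLabels]
    have hlen := congrArg List.length (List.takeWhile_append_dropWhile (p := pvIsMH) (l := rest))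
    simp only [List.length_append] at hlen
    simp [h, pvLabelsMH_length, ih]
    omega

theorem pvLoopA_eq : ∀ (n : Nat) (xs : List (String × String × Int)) (i : Nat) (labs : List String),
    xs.length ≤ n →
    (∀ t ∈ xs, t.1 = "L" ∨ t.1 = "M" ∨ t.1 = "H") →
    labs.length = i + xs.length →
    pvLoopA xs i labs = labs.take i ++ pvGLabels xs := by
  intro n
  induction n with
  | zero =>
    intro xs i labs hlen _ hl
    have hx : xs = [] := List.eq_nil_of_length_eq_zero (Nat.le_zero.mp hlen)
    subst hx
    rw [pvLoopA, pvGLabels, List.append_nil, List.take_of_length_le (by simp at hl; omega)]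
  | succ n ih =>
    intro xs i labs hlen hpre hl
    match xs with
    | [] =>
      rw [pvLoopA, pvGLabels, List.append_nil, List.take_of_length_le (by simp at hl; omega)]
    | t :: rest =>
      by_cases hL : t.1 = "L"
      · rw [pvLoopA, if_pos (by simp [hL])]
        rw [ih rest (i + 1) (labs.set i "0") (by simp at hlen; omega)
            (fun u hu => hpre u (by simp [hu])) (by simp at hl ⊢; omega)]
        rw [pvTake_succ_set labs i "0" (by simp at hl; omega)]
        rw [pvGLabels, if_pos (by simp [hL])]
        simp
      · have hMH : pvIsMH t = true := by
          rcases hpre t (by simp) with h | h | h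
          · exact absurd h hL
          · simp [pvIsMH, h]
          · simp [pvIsMH, h]
        have htwc : List.takeWhile pvIsMH (t :: rest) = t :: List.takeWhile pvIsMH rest := by
          simp [List.takeWhile_cons, hMH]
        have hdwc : List.dropWhile pvIsMH (t :: rest) = List.dropWhile pvIsMH rest := by
          simp [List.dropWhile_cons, hMH]
        rw [pvLoopA, if_neg (by simp [hL])]
        simp only [pvCollectA_eq, htwc, hdwc, pvPairs]
        rw [dif_neg (List.cons_ne_nil _ _)]
        set tw := List.takeWhile pvIsMH rest with htw
        set rem := List.dropWhile pvIsMH rest with hrem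
        have hrest : rest.length = tw.length + rem.length := by
          have h0 := congrArg List.length (List.takeWhile_append_dropWhile (p := pvIsMH) (l := rest))
          rw [← htw, ← hrem] at h0
          simp only [List.length_append] at h0
          omega
        have htwlen : tw.length ≤ rest.length := by omega
        simp only [List.length_cons] at hl hlen
        have hb1 : i + (tw.length + 1) ≤ labs.length := by omega
        -- the three labelling branches all write pvLabelsMH (t :: tw) into slots i..
        have hpairs : (i, t) :: pvPairs (i + 1) tw = pvPairs i (t :: tw) := by rw [pvPairs]
        have hlabs2 : ∀ (lab : (String × String × Int) → String),
            List.foldl (fun ls p => ls.set p.1 (lab p.2)) labs ((i, t) :: pvPairs (i + 1) tw)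
              = labs.take i ++ (t :: tw).map lab ++ labs.drop (i + (tw.length + 1)) := by
          intro lab
          rw [hpairs, pvSetFold lab (t :: tw) i labs (by simp; omega)]
          simp
        have hany : (((i, t) :: pvPairs (i + 1) tw).any fun p => p.2.1 == "H")
            = (t :: tw).any (fun u => u.1 == "H") := by
          rw [hpairs, pvPairs_anyH]
        have hlen2 : ((i, t) :: pvPairs (i + 1) tw).length = tw.length + 1 := by
          rw [hpairs, pvPairs_length]; rfl
        have hmap : List.map (fun p => p.2.2.2) ((i, t) :: pvPairs (i + 1) tw)
            = (t :: tw).map (fun u => u.2.2) := by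
          rw [hpairs, pvPairs_mapPow]
        have hbranches :
            (if (((i, t) :: pvPairs (i + 1) tw).any fun p => p.2.1 == "H") = true then
              List.foldl (fun ls p => ls.set p.1 (if (p.2.1 == "H") = true then "1" else "0")) labs ((i, t) :: pvPairs (i + 1) tw)
            else
              if ((i, t) :: pvPairs (i + 1) tw).length > 1 then
                List.foldl (fun ls p => ls.set p.1 (if (p.2.2.2 == (PySem.List.max? (List.map (fun p => p.2.2.2) ((i, t) :: pvPairs (i + 1) tw)) fun y => y).getD 0) = true then "1" else "0")) labs ((i, t) :: pvPairs (i + 1) tw)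
              else labs.set i "1")
            = labs.take i ++ pvLabelsMH (t :: tw) ++ labs.drop (i + (tw.length + 1)) := by
          rw [hany, hlen2, hmap]
          by_cases hH : (t :: tw).any (fun u => u.1 == "H") = true
          · rw [if_pos hH]
            rw [hlabs2 (fun u => if (u.1 == "H") = true then "1" else "0")]
            unfold pvLabelsMH
            rw [if_pos hH]
          · rw [if_neg hH]
            by_cases htwnil : tw = []
            · rw [htwnil] at hH ⊢
              simp only [List.length_nil, Nat.zero_add, gt_iff_lt, Nat.lt_irrefl, if_false]
              rw [pvSet_eq labs i "1" (by omega)]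
              have hHt : (t.1 == "H") = false := by simpa using hH
              simp [pvLabelsMH, hHt, PySem.List.max?_id_cons]
            · have hgt : tw.length + 1 > 1 := by
                have := List.length_pos_of_ne_nil htwnil
                omega
              rw [if_pos hgt]
              rw [hlabs2 (fun u => if (u.2.2 == (PySem.List.max? ((t :: tw).map (fun u => u.2.2)) fun y => y).getD 0) = true then "1" else "0")]
              unfold pvLabelsMH
              rw [if_neg hH]
        rw [hbranches]
        -- recursion on the remaining suffix
        have hlabs2len : (labs.take i ++ pvLabelsMH (t :: tw) ++ labs.drop (i + (tw.length + 1))).length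
            = (i + (tw.length + 1)) + rem.length := by
          simp [pvLabelsMH_length, List.length_take, List.length_drop]
          omega
        rw [show ((i, t) :: pvPairs (i + 1) tw).length = tw.length + 1 from hlen2]
        rw [ih rem (i + (tw.length + 1))
            (labs.take i ++ pvLabelsMH (t :: tw) ++ labs.drop (i + (tw.length + 1)))
            (by omega)
            (fun u hu => hpre u (by
              simp only [List.mem_cons]
              exact Or.inr ((List.dropWhile_sublist (p := pvIsMH) (l := rest)).subset (hrem ▸ hu))))
            hlabs2len]
        have htake : (labs.take i ++ pvLabelsMH (t :: tw) ++ labs.drop (i + (tw.length + 1))).take (i + (tw.length + 1))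
            = labs.take i ++ pvLabelsMH (t :: tw) := by
          rw [List.take_left' (by simp [pvLabelsMH_length, List.length_take]; omega)]
        rw [htake]
        rw [pvGLabels, if_neg (by simp [hL])]
        rw [← htw, ← hrem]
        simp

-- A's final comprehension is pvZip
theorem pvRangeZip (ls : List String) (xs : List (String × String × Int)) (h : ls.length = xs.length) :
    (List.range xs.length).map (fun k => [ls.getD k "", (xs.getD k ("", "", 0)).2.1])
      = pvZip ls xs := by
  apply List.ext_getElem
  · simp [pvZip, h]
  · intro k h1 h2
    simp only [List.getElem_map, List.getElem_range, pvZip, List.getElem_zipWith]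
    congr 1
    · rw [List.getD_eq_getElem?_getD, List.getElem?_eq_getElem (by simp at h1; omega)]
      simp
    · rw [List.getD_eq_getElem?_getD, List.getElem?_eq_getElem (by simp at h1; omega)]
      simp

theorem pvA_eq (col : List (String × String × Int))
    (hpre : ∀ t ∈ col, t.1 = "L" ∨ t.1 = "M" ∨ t.1 = "H") :
    (List.range col.length).map
      (fun k => [(pvLoopA col 0 (List.replicate col.length "0")).getD k "",
                 (col.getD k ("", "", 0)).2.1])
      = pvZip (pvGLabels col) col := by
  rw [pvLoopA_eq col.length col 0 (List.replicate col.length "0") le_rfl hpre (by simp)]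
  simp only [List.take_zero, List.nil_append]
  exact pvRangeZip _ _ (pvGLabels_length col)

-- B-side lemmas ----------------------------------------------------------------

-- the sid list, abstractly
def pvSids (c : Int) : List (String × String × Int) → List Int
  | [] => []
  | t :: xs => (if t.1 == "L" then c + 1 else c) :: pvSids (if t.1 == "L" then c + 1 else c) xs

def pvFin (c : Int) : List (String × String × Int) → Int
  | [] => c
  | t :: xs => pvFin (if t.1 == "L" then c + 1 else c) xs

theorem pvSidStep_fold : ∀ (xs : List (String × String × Int)) (acc : List Int) (c : Int),
    xs.foldl pvSidStep (acc, c) = (acc ++ pvSids c xs, pvFin c xs) := by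
  intro xs
  induction xs with
  | nil => intro acc c; simp [pvSids, pvFin]
  | cons t xs ih =>
    intro acc c
    simp only [List.foldl_cons, pvSidStep, pvSids, pvFin, ih]
    simp

theorem pvSids_ge (c : Int) (xs : List (String × String × Int)) :
    ∀ s ∈ pvSids c xs, c ≤ s := by
  induction xs generalizing c with
  | nil => simp [pvSids]
  | cons t xs ih =>
    intro s hs
    rw [pvSids] at hs
    rcases List.mem_cons.mp hs with rfl | hs
    · split <;> omega
    · have := ih (if t.1 == "L" then c + 1 else c) s hs
      split at this <;> omega

-- an all-non-L prefix keeps the counter constant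
theorem pvSids_nonL_prefix : ∀ (run rem : List (String × String × Int)) (c : Int),
    (∀ u ∈ run, ¬ u.1 = "L") →
    pvSids c (run ++ rem) = List.replicate run.length c ++ pvSids c rem := by
  intro run
  induction run with
  | nil => simp
  | cons u run ih =>
    intro rem c h
    have hu : (u.1 == "L") = false := by simp [h u (by simp)]
    simp only [List.cons_append, pvSids, hu, Bool.false_eq_true, if_false, List.length_cons,
      List.replicate_succ]
    rw [ih rem c (fun v hv => h v (by simp [hv]))]

theorem pvDropWhile_head {α : Type} (p : α → Bool) :
    ∀ (l : List α) (w : α) (ws : List α), l.dropWhile p = w :: ws → p w = false := by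
  intro l
  induction l with
  | nil => intro w ws h; cases h
  | cons a l ih =>
    intro w ws h
    rw [List.dropWhile_cons] at h
    split at h
    · exact ih w ws h
    · cases h; simpa using ‹¬ p a = true›

-- dict fold: pairs that never touch key k leave both get? at k unchanged
theorem pvAgg_untouched : ∀ (l : List (Int × (String × String × Int)))
    (d : PySem.Dict Int Bool × PySem.Dict Int Int) (k : Int),
    (∀ p ∈ l, ¬ p.2.1 = "L" → p.1 ≠ k) →
    ((l.foldl pvAggStep d).1.get? k = d.1.get? k ∧ (l.foldl pvAggStep d).2.get? k = d.2.get? k) := by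
  intro l
  induction l with
  | nil => intro d k _; exact ⟨rfl, rfl⟩
  | cons p l ih =>
    intro d k h
    simp only [List.foldl_cons]
    by_cases hL : p.2.1 = "L"
    · rw [show pvAggStep d p = d by simp [pvAggStep, hL]]
      exact ih d k (fun q hq => h q (by simp [hq]))
    · have hk : p.1 ≠ k := h p (by simp) hL
      have hstep : pvAggStep d p
          = (d.1.insert p.1 ((d.1.getD p.1 false) || (p.2.1 == "H")),
             d.2.insert p.1 (max (d.2.getD p.1 p.2.2.2) p.2.2.2)) := by
        simp [pvAggStep, hL]
      rw [hstep]
      have hrec := ih (d.1.insert p.1 ((d.1.getD p.1 false) || (p.2.1 == "H")),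
        d.2.insert p.1 (max (d.2.getD p.1 p.2.2.2) p.2.2.2)) k (fun q hq => h q (by simp [hq]))
      rw [hrec.1, hrec.2,
        PySem.Dict.get?_insert_of_ne _ _ (Ne.symm hk),
        PySem.Dict.get?_insert_of_ne _ _ (Ne.symm hk)]
      exact ⟨rfl, rfl⟩

-- dict fold over a non-L run whose pairs all carry key c, key already present
theorem pvAgg_run_present : ∀ (us : List (String × String × Int)) (c : Int)
    (d : PySem.Dict Int Bool × PySem.Dict Int Int) (b : Bool) (m : Int),
    d.1.get? c = some b → d.2.get? c = some m →
    (∀ u ∈ us, ¬ u.1 = "L") →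
    (((List.replicate us.length c).zip us).foldl pvAggStep d).1.get? c
        = some (b || us.any (fun u => u.1 == "H")) ∧
    (((List.replicate us.length c).zip us).foldl pvAggStep d).2.get? c
        = some (us.foldl (fun m u => max m u.2.2) m) := by
  intro us
  induction us with
  | nil => intro c d b m hb hm _; simp [hb, hm]
  | cons u us ih =>
    intro c d b m hb hm h
    have hu : ¬ u.1 = "L" := h u (by simp)
    simp only [List.length_cons, List.replicate_succ, List.zip_cons_cons, List.foldl_cons]
    have hstep : pvAggStep d (c, u)
        = (d.1.insert c ((d.1.getD c false) || (u.1 == "H")),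
           d.2.insert c (max (d.2.getD c u.2.2) u.2.2)) := by
      simp [pvAggStep, hu]
    rw [hstep]
    have hgb : d.1.getD c false = b := PySem.Dict.getD_of_get?_eq_some _ _ hb
    have hgm : d.2.getD c u.2.2 = m := PySem.Dict.getD_of_get?_eq_some _ _ hm
    rw [hgb, hgm]
    have := ih c (d.1.insert c ((b : Bool) || (u.1 == "H")), d.2.insert c (max m u.2.2)) (b || (u.1 == "H")) (max m u.2.2)
      (PySem.Dict.get?_insert_self _ _ _) (PySem.Dict.get?_insert_self _ _ _)
      (fun v hv => h v (by simp [hv]))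
    refine ⟨?_, ?_⟩
    · rw [this.1]; simp [Bool.or_assoc]
    · rw [this.2]

-- full aggregate for a nonempty non-L run starting from key-c-free dicts
theorem pvAgg_run (t : String × String × Int) (tw : List (String × String × Int)) (c : Int)
    (d : PySem.Dict Int Bool × PySem.Dict Int Int)
    (hb : d.1.get? c = none) (hm : d.2.get? c = none)
    (ht : ¬ t.1 = "L") (htw : ∀ u ∈ tw, ¬ u.1 = "L") :
    (((List.replicate (t :: tw).length c).zip (t :: tw)).foldl pvAggStep d).1.get? c
        = some ((t :: tw).any (fun u => u.1 == "H")) ∧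
    (((List.replicate (t :: tw).length c).zip (t :: tw)).foldl pvAggStep d).2.get? c
        = some (tw.foldl (fun m u => max m u.2.2) t.2.2) := by
  simp only [List.length_cons, List.replicate_succ, List.zip_cons_cons, List.foldl_cons]
  have hstep : pvAggStep d (c, t)
      = (d.1.insert c ((d.1.getD c false) || (t.1 == "H")),
         d.2.insert c (max (d.2.getD c t.2.2) t.2.2)) := by
    simp [pvAggStep, ht]
  rw [hstep]
  rw [PySem.Dict.getD_of_get?_eq_none _ _ hb, PySem.Dict.getD_of_get?_eq_none _ _ hm]
  have := pvAgg_run_present tw c (d.1.insert c (false || (t.1 == "H")), d.2.insert c (max t.2.2 t.2.2)) (false || (t.1 == "H")) (max t.2.2 t.2.2)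
    (PySem.Dict.get?_insert_self _ _ _) (PySem.Dict.get?_insert_self _ _ _) htw
  refine ⟨?_, ?_⟩
  · rw [this.1]; simp
  · rw [this.2]; simp

-- the output-append fold is a map
theorem pvEmit_map (d : PySem.Dict Int Bool × PySem.Dict Int Int)
    (l : List (Int × (String × String × Int))) :
    l.foldl (fun out p => out ++ [pvLabelOf d p]) [] = l.map (pvLabelOf d) := by
  rw [PySem.List.foldl_append_singleton_eq_map]
  simp

theorem pvZip_map_left (g : (String × String × Int) → String) :
    ∀ (l : List (String × String × Int)),
    pvZip (l.map g) l = l.map (fun u => [g u, u.2.1]) := by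
  intro l
  induction l with
  | nil => rfl
  | cons u l ih => simp [pvZip] at ih ⊢; exact ih

theorem pvZip_append (a b : List String) (x y : List (String × String × Int))
    (h : a.length = x.length) :
    pvZip (a ++ b) (x ++ y) = pvZip a x ++ pvZip b y := by
  unfold pvZip; exact List.zipWith_append h

-- B's main lemma: labelling the suffix xs (counter c, prefix aggregates d) gives pvGLabels
theorem pvBMain : ∀ (n : Nat) (xs : List (String × String × Int)) (c : Int)
    (d : PySem.Dict Int Bool × PySem.Dict Int Int),
    xs.length ≤ n →
    (∀ t ∈ xs, t.1 = "L" ∨ t.1 = "M" ∨ t.1 = "H") →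
    (∀ p ∈ (pvSids c xs).zip xs, ¬ p.2.1 = "L" → d.1.get? p.1 = none ∧ d.2.get? p.1 = none) →
    ((pvSids c xs).zip xs).map (pvLabelOf (((pvSids c xs).zip xs).foldl pvAggStep d))
      = pvZip (pvGLabels xs) xs := by
  intro n
  induction n with
  | zero =>
    intro xs c d hlen _ _
    have : xs = [] := List.eq_nil_of_length_eq_zero (Nat.le_zero.mp hlen)
    subst this
    simp [pvSids, pvGLabels, pvZip]
  | succ n ih =>
    intro xs c d hlen hpre hfree
    match xs with
    | [] => simp [pvSids, pvGLabels, pvZip]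
    | t :: rest =>
      by_cases hL : t.1 = "L"
      · have hsid : pvSids c (t :: rest) = (c + 1) :: pvSids (c + 1) rest := by
          simp [pvSids, hL]
        rw [hsid]
        simp only [List.zip_cons_cons, List.foldl_cons, List.map_cons]
        rw [show pvAggStep d (c + 1, t) = d by simp [pvAggStep, hL]]
        have hrec := ih rest (c + 1) d (by simp at hlen; omega)
          (fun u hu => hpre u (by simp [hu]))
          (fun p hp hnl => hfree p (by rw [hsid]; simp [hp]) hnl)
        rw [hrec]
        rw [pvGLabels, if_pos (by simp [hL])]
        rw [show pvLabelOf _ (c + 1, t) = ["0", t.2.1] by simp [pvLabelOf, hL]]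
        simp [pvZip]
      · -- head of a maximal M/H run
        have hrunL : ∀ u ∈ t :: rest.takeWhile pvIsMH, ¬ u.1 = "L" := by
          intro u hu
          rcases List.mem_cons.mp hu with rfl | hu2
          · exact hL
          · have := List.mem_takeWhile_imp hu2
            simp [pvIsMH] at this
            rcases this with h | h <;> simp [h]
        set tw := rest.takeWhile pvIsMH with htwdef
        set rem := rest.dropWhile pvIsMH with hremdef
        have hsplit : t :: rest = (t :: tw) ++ rem := by
          rw [htwdef, hremdef]; simp [List.takeWhile_append_dropWhile]
        -- rem is empty or starts with an 'L'
        have hremhead : ∀ w ws, rem = w :: ws → w.1 = "L" := by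
          intro w ws hrm
          have hw : pvIsMH w = false := pvDropWhile_head pvIsMH rest w ws (by rw [← hremdef, hrm])
          rcases hpre w (by rw [hsplit, hrm]; simp) with h | h | h
          · exact h
          · rw [pvIsMH, h] at hw; simp at hw
          · rw [pvIsMH, h] at hw; simp at hw
        have hremsid : ∀ s ∈ pvSids c rem, s ≠ c := by
          intro s hs
          match hrm : rem, hs with
          | [], hs => simp [pvSids] at hs
          | w :: ws, hs =>
            have hwL : w.1 = "L" := hremhead w ws rfl
            rw [show pvSids c (w :: ws) = (c + 1) :: pvSids (c + 1) ws by
              simp [pvSids, hwL]] at hs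
            rcases List.mem_cons.mp hs with rfl | hs
            · omega
            · have := pvSids_ge (c + 1) ws s hs; omega
        have hsid : pvSids c (t :: rest)
            = List.replicate (t :: tw).length c ++ pvSids c rem := by
          rw [show pvSids c (t :: rest) = pvSids c ((t :: tw) ++ rem) from by rw [← hsplit]]
          exact pvSids_nonL_prefix (t :: tw) rem c hrunL
        -- split the zip
        have hzip : (pvSids c (t :: rest)).zip (t :: rest)
            = ((List.replicate (t :: tw).length c).zip (t :: tw)) ++ ((pvSids c rem).zip rem) := by
          rw [hsid]
          conv_lhs => rw [hsplit]
          exact List.zip_append (by simp)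
        rw [hzip]
        set runZip := (List.replicate (t :: tw).length c).zip (t :: tw) with hrz
        set remZip := (pvSids c rem).zip rem with hmz
        have hrunkeys : ∀ p ∈ runZip, p.1 = c := by
          intro p hp
          exact List.eq_of_mem_replicate (List.of_mem_zip hp).1
        have hremkeys : ∀ p ∈ remZip, p.1 ≠ c := by
          intro p hp
          exact hremsid p.1 (List.of_mem_zip hp).1
        -- full dict = fold over runZip then remZip
        rw [List.foldl_append]
        set d' := runZip.foldl pvAggStep d with hd'
        -- d is key-c free (hfree at the first pair of the zip)
        have hmemfirst : ((c, t) : Int × (String × String × Int)) ∈ (pvSids c (t :: rest)).zip (t :: rest) := by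
          rw [hsid]
          simp only [List.length_cons, List.replicate_succ, List.cons_append, List.zip_cons_cons]
          simp
        have hdfree := hfree (c, t) hmemfirst hL
        -- aggregates for key c after the run fold
        have hagg : d'.1.get? c = some ((t :: tw).any (fun u => u.1 == "H")) ∧
            d'.2.get? c = some (tw.foldl (fun m u => max m u.2.2) t.2.2) :=
          pvAgg_run t tw c d hdfree.1 hdfree.2 hL (fun u hu => hrunL u (by simp [hu]))
        -- rem fold leaves key c untouched
        have huntouch := pvAgg_untouched remZip d' c (fun p hp _ => hremkeys p hp)
        set D := remZip.foldl pvAggStep d' with hD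
        have hDfullH : D.1.get? c = some ((t :: tw).any (fun u => u.1 == "H")) := by
          rw [hD, huntouch.1]; exact hagg.1
        have hDfullM : D.2.get? c = some (tw.foldl (fun m u => max m u.2.2) t.2.2) := by
          rw [hD, huntouch.2]; exact hagg.2
        rw [List.map_append]
        -- run labels
        have hgetDH : D.1.getD c false = (t :: tw).any (fun u => u.1 == "H") :=
          PySem.Dict.getD_of_get?_eq_some _ _ hDfullH
        have hgetDM : D.2.getD c 0 = tw.foldl (fun m u => max m u.2.2) t.2.2 :=
          PySem.Dict.getD_of_get?_eq_some _ _ hDfullM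
        have hmaxeq : (PySem.List.max? ((t :: tw).map (fun u => u.2.2)) (fun y => y)).getD 0
            = tw.foldl (fun m u => max m u.2.2) t.2.2 := by
          rw [List.map_cons, PySem.List.max?_id_cons]
          simp [List.foldl_map]
        have hrunlabel : runZip.map (pvLabelOf D) = pvZip (pvLabelsMH (t :: tw)) (t :: tw) := by
          have hzmap : runZip = (t :: tw).map (fun u => (c, u)) := by
            rw [hrz]
            generalize (t :: tw) = l
            induction l with
            | nil => rfl
            | cons v l ihl => simp [List.replicate_succ, ihl]
          rw [hzmap, List.map_map]
          unfold pvLabelsMH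
          by_cases hH : ((t :: tw).any (fun u => u.1 == "H")) = true
          · rw [if_pos hH, pvZip_map_left]
            apply List.map_congr_left
            intro u hu
            have hunl : ¬ u.1 = "L" := hrunL u hu
            simp only [Function.comp_apply, pvLabelOf, hgetDH, hH]
            simp [hunl]
          · rw [if_neg hH, pvZip_map_left]
            apply List.map_congr_left
            intro u hu
            have hunl : ¬ u.1 = "L" := hrunL u hu
            have hgf : D.1.getD c false = false := by rw [hgetDH]; exact Bool.eq_false_iff.mpr hH
            simp only [Function.comp_apply, pvLabelOf, hgf, hmaxeq, hgetDM]
            simp [hunl]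
        rw [hrunlabel]
        -- rem labels: recurse with base d' (key-free for every non-L sid of rem)
        have hremlen : rem.length ≤ n := by
          have h1 := List.length_dropWhile_le pvIsMH rest
          simp only [List.length_cons] at hlen
          rw [hremdef]; omega
        have hrempre : ∀ u ∈ rem, u.1 = "L" ∨ u.1 = "M" ∨ u.1 = "H" := by
          intro u hu
          exact hpre u (by rw [hsplit]; exact List.mem_append_right _ hu)
        have hremfree : ∀ p ∈ (pvSids c rem).zip rem, ¬ p.2.1 = "L" →
            d'.1.get? p.1 = none ∧ d'.2.get? p.1 = none := by
          intro p hp hnl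
          have hne : p.1 ≠ c := hremkeys p hp
          have hrununt := pvAgg_untouched runZip d p.1
            (fun q hq _ => by rw [hrunkeys q hq]; exact fun h => hne h.symm)
          have hdf := hfree p (by rw [hzip]; exact List.mem_append_right _ hp) hnl
          rw [hd']
          exact ⟨by rw [hrununt.1]; exact hdf.1, by rw [hrununt.2]; exact hdf.2⟩
        have hrec : remZip.map (pvLabelOf D) = pvZip (pvGLabels rem) rem :=
          ih rem c d' hremlen hrempre hremfree
        rw [hrec]
        -- assemble against pvGLabels
        rw [pvGLabels, if_neg (by simp [hL])]
        rw [← htwdef, ← hremdef]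
        conv_rhs => rw [hsplit]
        rw [pvZip_append _ _ _ _ (by simp [pvLabelsMH_length])]

-- assembling -------------------------------------------------------------------

theorem pvB_eq (col : List (String × String × Int))
    (hpre : ∀ t ∈ col, t.1 = "L" ∨ t.1 = "M" ∨ t.1 = "H") :
    (((col.foldl pvSidStep ([], 0)).1.zip col).foldl
        (fun out p => out ++ [pvLabelOf (((col.foldl pvSidStep ([], 0)).1.zip col).foldl pvAggStep (PySem.Dict.empty, PySem.Dict.empty)) p]) [])
      = pvZip (pvGLabels col) col := by
  rw [pvSidStep_fold col [] 0]
  simp only [List.nil_append]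
  rw [pvEmit_map]
  exact pvBMain col.length col 0 (PySem.Dict.empty, PySem.Dict.empty) le_rfl hpre
    (fun p _ _ => ⟨PySem.Dict.get?_empty _, PySem.Dict.get?_empty _⟩)

-- ===== VERDICT (by name: the statement is the Claim_ definition above) =====
theorem matrice_transition_edge_spec : Claim_equal_matrice_transition_edge := by
  intro ordered col_idx n_col _hDom hpre
  unfold Spec_matrice_transition_edge
  unfold matrice_transition_edge matrice_transition_edge_alt
  have h2 := hpre.2
  rw [pvA_eq _ h2, pvB_eq _ h2]
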